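-- pv_equiv track=rewrite | github.com/yassinalamelden/Protein_Folding_Model | methods/GA_Method/genatic_algorithm_method_streamlit.py | square_fold_protein
-- ===== SOURCE A (Python) =====
-- square_directions = [(0, 1), (1, 0), (0, -1), (-1, 0)]
--
-- def square_fold_protein(sequence, moves):
--     square_direction = 0
--     square_position = (0, 0)
--     square_coords = [square_position]
--     square_occupied = {square_position}
--     for move in moves:
--         square_direction = (square_direction - 1) % 4 if move == 1 else (square_direction + 1) % 4 if move == 2 else square_direction
--         dx, dy = square_directions[square_direction]
--         square_position = (square_position[0] + dx, square_position[1] + dy)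
--         if square_position in square_occupied:
--             return None
--         square_coords.append(square_position)
--         square_occupied.add(square_position)
--     return square_coords
-- ===== SOURCE B (Python) =====
-- square_directions = [(0, 1), (1, 0), (0, -1), (-1, 0)]
--
-- def square_fold_protein(sequence, moves):
--     # Stage 1: direction index after move i is the running sum of turn deltas, mod 4.
--     deltas = [-1 if m == 1 else 1 if m == 2 else 0 for m in moves]
--     dirs, t = [], 0
--     for d in deltas:
--         t += d
--         dirs.append(t % 4)
--     # Stage 2: step vectors, then coordinates as running sums.
--     steps = [square_directions[d] for d in dirs]
--     path, x, y = [(0, 0)], 0, 0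
--     for dx, dy in steps:
--         x += dx
--         y += dy
--         path.append((x, y))
--     # Stage 3: the fold is invalid iff the path revisits a cell:
--     # sort the path and look for an equal adjacent pair.
--     srt = sorted(path)
--     if any(a == b for a, b in zip(srt, srt[1:])):
--         return None
--     return path
-- ===== Notes on version B (the rewrite author's own statement) =====
-- stated objective: alternative
-- what changed: A simulates the walk statefully with an occupied-set and returns None at the first collision; B is a staged pipeline with no collision state: turn deltas, direction indices as prefix sums mod 4, step vectors, coordinates as running sums, and finally self-intersection detected by sorting the full path and scanning for an equal adjacent pair.
import Mathlib
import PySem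

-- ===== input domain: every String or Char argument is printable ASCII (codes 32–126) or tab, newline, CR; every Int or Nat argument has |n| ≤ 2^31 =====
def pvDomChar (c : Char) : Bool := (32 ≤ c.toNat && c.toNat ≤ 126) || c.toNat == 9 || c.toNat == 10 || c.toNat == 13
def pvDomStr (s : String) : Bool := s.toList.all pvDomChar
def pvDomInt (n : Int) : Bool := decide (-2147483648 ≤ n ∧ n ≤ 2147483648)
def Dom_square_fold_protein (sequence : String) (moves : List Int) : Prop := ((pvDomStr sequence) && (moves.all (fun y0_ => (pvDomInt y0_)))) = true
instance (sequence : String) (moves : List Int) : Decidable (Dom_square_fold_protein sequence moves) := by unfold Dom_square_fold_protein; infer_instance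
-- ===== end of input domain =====

-- B replaces A's stateful early-exit walk with a staged pipeline (turn deltas → prefix-sum directions → step vectors → running-sum coordinates) and detects self-intersection by sorting the path and scanning for an equal adjacent pair.

-- ===== PORT A =====
def square_directions : List (Int × Int) := [(0, 1), (1, 0), (0, -1), (-1, 0)]

-- A's for-loop: state (direction, position, coords, occupied), early return None on collision.
def sfpLoopA : List Int → Int → (Int × Int) → List (Int × Int) → PySem.Set (Int × Int) → Option (List (Int × Int))
  | [], _, _, coords, _ => some coords
  | move :: rest, dir, pos, coords, occ =>
    let dir' := if move = 1 then PySem.Int.mod (dir - 1) 4 else if move = 2 then PySem.Int.mod (dir + 1) 4 else dir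
    -- dir' ∈ [0,4) always, so the index is in range; .getD totalizes the unreachable branch
    let v := (PySem.List.pyGet? square_directions dir').getD (0, 0)
    let pos' := (pos.1 + v.1, pos.2 + v.2)
    if PySem.Set.contains occ pos' then none
    else sfpLoopA rest dir' pos' (coords ++ [pos']) (PySem.Set.add occ pos')

def square_fold_protein (sequence : String) (moves : List Int) : Option (List (Int × Int)) :=
  sfpLoopA moves 0 (0, 0) [((0 : Int), (0 : Int))] (PySem.Set.add PySem.Set.empty ((0 : Int), (0 : Int)))

-- ===== PORT B =====
-- Stage 1 loop of Source B: running sum t of turn deltas, appending t % 4.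
def sfpDirs : List Int → Int → List Int
  | [], _ => []
  | d :: rest, t => PySem.Int.mod (t + d) 4 :: sfpDirs rest (t + d)

-- square_directions[d]; d ∈ [0,4) always, .getD totalizes the unreachable branch
def sfpStep (d : Int) : Int × Int := (PySem.List.pyGet? square_directions d).getD (0, 0)

-- Stage 2 loop of Source B: coordinates as running sums of the step vectors.
def sfpPath : List (Int × Int) → Int → Int → List (Int × Int)
  | [], _, _ => []
  | v :: rest, x, y => (x + v.1, y + v.2) :: sfpPath rest (x + v.1) (y + v.2)

def square_fold_protein_alt (sequence : String) (moves : List Int) : Option (List (Int × Int)) :=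
  let deltas := moves.map (fun m => if m = 1 then (-1 : Int) else if m = 2 then 1 else 0)
  let dirs := sfpDirs deltas 0
  let steps := dirs.map sfpStep
  let path : List (Int × Int) := ((0 : Int), (0 : Int)) :: sfpPath steps 0 0
  -- sorted(path): Python's lexicographic tuple comparison
  let srt := PySem.List.sorted2 path (fun p => p.1) (fun p => p.2)
  -- any(a == b for a, b in zip(srt, srt[1:]))
  if (srt.zip (PySem.List.slice srt (some 1) none)).any (fun p => decide (p.1 = p.2)) then none
  else some path

-- ===== PRECONDITION & SPEC =====
def Spec_square_fold_protein (sequence : String) (moves : List Int) (out : Option (List (Int × Int))) : Prop := out = square_fold_protein_alt sequence moves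
instance (sequence : String) (moves : List Int) (out : Option (List (Int × Int))) : Decidable (Spec_square_fold_protein sequence moves out) := by unfold Spec_square_fold_protein; infer_instance

-- ===== CLAIM (what is proved, stated in full; the proofs are below) =====
def Claim_equal_square_fold_protein : Prop := ∀ (sequence : String) (moves : List Int), Dom_square_fold_protein sequence moves → Spec_square_fold_protein sequence moves (square_fold_protein sequence moves)

-- ===== LEMMAS AND PROOFS =====

-- Proof-side description of the walk: positions generated from A's direction state.
def sfpWalk : List Int → Int → Int → Int → List (Int × Int)
  | [], _, _, _ => []
  | move :: rest, dir, x, y =>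
    let dir' := if move = 1 then PySem.Int.mod (dir - 1) 4 else if move = 2 then PySem.Int.mod (dir + 1) 4 else dir
    let v := sfpStep dir'
    (x + v.1, y + v.2) :: sfpWalk rest dir' (x + v.1) (y + v.2)

-- A's loop, run with occupied = coords (a Nodup list), returns the full walk iff it is duplicate-free.
lemma sfpLoopA_eq (moves : List Int) : ∀ (dir : Int) (pos : Int × Int) (coords : List (Int × Int)),
    coords.Nodup →
    sfpLoopA moves dir pos coords coords =
      (if (coords ++ sfpWalk moves dir pos.1 pos.2).Nodup
       then some (coords ++ sfpWalk moves dir pos.1 pos.2) else none) := by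
  induction moves with
  | nil => intro dir pos coords h; simp [sfpLoopA, sfpWalk, h]
  | cons move rest ih =>
    intro dir pos coords h
    simp only [sfpLoopA, sfpWalk, sfpStep]
    set dir' := if move = 1 then PySem.Int.mod (dir - 1) 4 else if move = 2 then PySem.Int.mod (dir + 1) 4 else dir with hdir'
    set v := (PySem.List.pyGet? square_directions dir').getD (0, 0) with hv
    set pos' : Int × Int := (pos.1 + v.1, pos.2 + v.2) with hpos'
    by_cases hmem : pos' ∈ coords
    · rw [if_pos (by simpa [PySem.Set.contains_iff, sfpStep] using hmem)]
      rw [if_neg]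
      intro hnd
      exact (List.disjoint_of_nodup_append hnd) hmem (List.mem_cons_self ..)
    · rw [if_neg (by simpa [PySem.Set.contains_iff] using hmem)]
      rw [PySem.Set.add_of_not_mem hmem]
      have hnd' : (coords ++ [pos']).Nodup := by
        exact h.append (List.nodup_singleton _) (List.disjoint_singleton.2 hmem)
      have := ih dir' pos' (coords ++ [pos']) hnd'
      simpa [sfpStep, List.append_assoc] using this

-- B's pipeline tail equals the walk whenever the running sum t reduces (mod 4) to A's direction state.
lemma pipeline_eq_walk (moves : List Int) : ∀ (t dir x y : Int), PySem.Int.mod t 4 = dir →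
    sfpPath ((sfpDirs (moves.map (fun m => if m = 1 then (-1 : Int) else if m = 2 then 1 else 0)) t).map sfpStep) x y
      = sfpWalk moves dir x y := by
  induction moves with
  | nil => intro t dir x y _; simp [sfpDirs, sfpPath, sfpWalk]
  | cons move rest ih =>
    intro t dir x y ht
    simp only [List.map_cons, sfpDirs, sfpPath, sfpWalk]
    have hmod : PySem.Int.mod (t + (if move = 1 then (-1 : Int) else if move = 2 then 1 else 0)) 4
        = (if move = 1 then PySem.Int.mod (dir - 1) 4 else if move = 2 then PySem.Int.mod (dir + 1) 4 else dir) := by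
      subst ht
      split_ifs <;>
        simp only [PySem.Int.mod_eq_emod_of_pos (b := 4) (by norm_num : (0 : Int) < 4)] <;>
        omega
    rw [hmod]
    exact congrArg _ (ih (t + (if move = 1 then (-1 : Int) else if move = 2 then 1 else 0)) _ _ _ hmod)

-- Python's lexicographic ≤ on int pairs.
def sfpLexLe (p q : Int × Int) : Prop := p.1 < q.1 ∨ (p.1 = q.1 ∧ p.2 ≤ q.2)

lemma sfpLexLe_trans {p q r : Int × Int} (h1 : sfpLexLe p q) (h2 : sfpLexLe q r) : sfpLexLe p r := by
  obtain ⟨a, b⟩ := p; obtain ⟨c, d⟩ := q; obtain ⟨e, f⟩ := r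
  simp only [sfpLexLe] at h1 h2 ⊢
  omega

lemma sfpLexLe_antisymm {p q : Int × Int} (h1 : sfpLexLe p q) (h2 : sfpLexLe q p) : p = q := by
  obtain ⟨a, b⟩ := p; obtain ⟨c, d⟩ := q
  simp only [sfpLexLe] at h1 h2
  simp only [Prod.mk.injEq]
  omega

-- the strict comparison sorted2 uses, for k1 = fst, k2 = snd
def sfpBefore (p q : Int × Int) : Bool :=
  decide (p.1 < q.1) || !decide (q.1 < p.1) && decide (p.2 < q.2)

lemma sfpBefore_le {p q : Int × Int} (h : sfpBefore p q = true) : sfpLexLe p q := by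
  obtain ⟨a, b⟩ := p; obtain ⟨c, d⟩ := q
  simp only [sfpBefore, Bool.or_eq_true, Bool.and_eq_true, Bool.not_eq_true',
    decide_eq_true_eq, decide_eq_false_iff_not, not_lt] at h
  simp only [sfpLexLe]
  omega

lemma sfpBefore_false_le {p q : Int × Int} (h : sfpBefore p q = false) : sfpLexLe q p := by
  obtain ⟨a, b⟩ := p; obtain ⟨c, d⟩ := q
  simp only [sfpBefore, Bool.or_eq_false_iff, Bool.and_eq_false_iff, Bool.not_eq_false',
    decide_eq_true_eq, decide_eq_false_iff_not, not_lt] at h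
  simp only [sfpLexLe]
  omega

lemma insertBy_pairwise (x : Int × Int) (l : List (Int × Int))
    (h : l.Pairwise sfpLexLe) : (PySem.List.insertBy sfpBefore x l).Pairwise sfpLexLe := by
  induction l with
  | nil => simp [PySem.List.insertBy]
  | cons y ys ih =>
    rw [List.pairwise_cons] at h
    by_cases hb : sfpBefore x y = true
    · have hxy := sfpBefore_le hb
      have : PySem.List.insertBy sfpBefore x (y :: ys) = x :: y :: ys := by
        simp [PySem.List.insertBy, hb]
      rw [this, List.pairwise_cons]
      refine ⟨?_, List.pairwise_cons.2 h⟩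
      intro z hz
      rcases List.mem_cons.1 hz with rfl | hz
      · exact hxy
      · exact sfpLexLe_trans hxy (h.1 z hz)
    · have hyx := sfpBefore_false_le (by simpa using hb)
      have : PySem.List.insertBy sfpBefore x (y :: ys) = y :: PySem.List.insertBy sfpBefore x ys := by
        simp [PySem.List.insertBy, hb]
      rw [this, List.pairwise_cons]
      refine ⟨?_, ih h.2⟩
      intro z hz
      rw [PySem.List.mem_insertBy] at hz
      rcases hz with rfl | hz
      · exact hyx
      · exact h.1 z hz

lemma foldl_insertBy_pairwise (xs : List (Int × Int)) :
    ∀ acc : List (Int × Int), acc.Pairwise sfpLexLe →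
      (xs.foldl (fun acc x => PySem.List.insertBy sfpBefore x acc) acc).Pairwise sfpLexLe := by
  induction xs with
  | nil => intro acc h; simpa using h
  | cons x xs ih => intro acc h; exact ih _ (insertBy_pairwise x acc h)

lemma sorted2_pairwise (xs : List (Int × Int)) :
    (PySem.List.sorted2 xs (fun p => p.1) (fun p => p.2) false).Pairwise sfpLexLe := by
  have : PySem.List.sorted2 xs (fun p => p.1) (fun p => p.2) false =
      xs.foldl (fun acc x => PySem.List.insertBy sfpBefore x acc) [] := rfl
  rw [this]
  exact foldl_insertBy_pairwise xs [] (by simp)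

-- On a lex-sorted list, no equal adjacent pair ⟺ no duplicates at all.
lemma adj_dup_iff (l : List (Int × Int)) (h : l.Pairwise sfpLexLe) :
    ((l.zip (l.drop 1)).any (fun p => decide (p.1 = p.2)) = false) ↔ l.Nodup := by
  induction l with
  | nil => simp
  | cons a t ih =>
    cases t with
    | nil => simp
    | cons b t' =>
      rw [List.pairwise_cons] at h
      simp only [List.drop_succ_cons, List.drop_zero] at ih ⊢
      simp only [List.zip_cons_cons, List.any_cons,
        Bool.or_eq_false_iff, decide_eq_false_iff_not]
      by_cases hab : a = b
      · constructor
        · rintro ⟨h1, _⟩; exact absurd hab h1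
        · intro hnd; exact absurd (by simp [hab] : a ∈ b :: t') (List.nodup_cons.1 hnd).1
      · have hnotmem : a ∉ b :: t' := by
          intro hmem
          rcases List.mem_cons.1 hmem with rfl | hmem
          · exact hab rfl
          · have h1 : sfpLexLe a b := h.1 b (List.mem_cons_self ..)
            have h2 : sfpLexLe b a := (List.pairwise_cons.1 h.2).1 a hmem
            exact hab (sfpLexLe_antisymm h1 h2)
        rw [ih h.2]
        constructor
        · rintro ⟨_, hnd⟩; exact List.nodup_cons.2 ⟨hnotmem, hnd⟩
        · intro hnd; exact ⟨hab, (List.nodup_cons.1 hnd).2⟩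

-- ===== VERDICT (by name: the statement is the Claim_ definition above) =====
theorem square_fold_protein_spec : Claim_equal_square_fold_protein := by
  intro sequence moves _
  unfold Spec_square_fold_protein square_fold_protein
  dsimp only [square_fold_protein_alt]
  have h0 : PySem.Set.add (PySem.Set.empty) ((0 : Int), (0 : Int)) = [((0 : Int), (0 : Int))] := by decide
  rw [h0]
  have hnd1 : ([((0 : Int), (0 : Int))] : List (Int × Int)).Nodup := by decide
  have hA := sfpLoopA_eq moves 0 ((0 : Int), (0 : Int)) [((0 : Int), (0 : Int))] hnd1
  simp only [List.singleton_append] at hA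
  rw [hA]
  rw [pipeline_eq_walk moves 0 0 0 0 (by decide)]
  set path : List (Int × Int) := ((0 : Int), (0 : Int)) :: sfpWalk moves 0 0 0 with hpath
  set srt := PySem.List.sorted2 path (fun p => p.1) (fun p => p.2) false with hsrt
  have hperm : srt.Perm path := PySem.List.sorted2_perm path _ _ false
  have hslice : PySem.List.slice srt (some 1) none = srt.drop 1 :=
    PySem.List.slice_from srt (by norm_num)
  rw [hslice]
  have hadj := adj_dup_iff srt (sorted2_pairwise path)
  by_cases hp : path.Nodup
  · rw [if_pos hp, if_neg]
    rw [Bool.not_eq_true, hadj]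
    exact hperm.nodup_iff.2 hp
  · rw [if_neg hp, if_pos]
    rw [← Bool.not_eq_false, hadj, hperm.nodup_iff]
    exact hp
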